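/- GENERATED by farm/mkstatement.py from design/units.tsv (unit `residue_decode`) and the Specs of Vorbis/Spec/*.lean — do not edit.
   THE STATEMENT of the proof unit `residue_decode`: the function `residue_decode` (69 instructions) satisfies its contract,
   given the contracts of its callees. What the names mean: Vorbis/Spec/Basic.lean. The theorem to prove:
   `theorem residue_decode_ok : Vorbis.Spec.residue_decode.Statement`. -/
import Vorbis.Spec.Codebook
namespace Vorbis.Spec.residue_decode
open X86 X86.User Asan

/-- The statement of unit `residue_decode`. -/
def Statement : Prop :=
  ∀ (Lay : Layout) (_hLay : Lay.hi = 0x1000000) (μ : Microarch) (_hμ : UserX.MicroOK μ) (u₀ : State)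
    (_hcode : HasCodeNat Lay u₀ Vorbis.L.residue_decode.entry Vorbis.Code.code_residue_decode.nat Vorbis.L.residue_decode.size)
    (_h_asan_load4_noabort : Asan.SmallCheck Lay μ Vorbis.WayInv (Vorbis.CodeOK u₀) [.rax, .rcx, .rdx] 4 Vorbis.L.__asan_load4_noabort.entry)
    (_h_codebook_decode_step : ∀ (others : List Obj) (frames : List (Nat × FrameLayout)) (Blk : Block → Prop) (len : Nat), Calls Lay μ Vorbis.WayInv (Vorbis.conv u₀) Vorbis.L.codebook_decode_step.entry (Vorbis.Spec.codebook_decode_step.spec others frames Blk len))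
    (_h_codebook_decode : ∀ (others : List Obj) (frames : List (Nat × FrameLayout)) (Blk : Block → Prop) (len : Nat), Calls Lay μ Vorbis.WayInv (Vorbis.conv u₀) Vorbis.L.codebook_decode.entry (Vorbis.Spec.codebook_decode.spec others frames Blk len)),
    ∀ (others : List Obj) (frames : List (Nat × FrameLayout)) (Blk : Block → Prop) (len : Nat), Calls Lay μ Vorbis.WayInv (Vorbis.conv u₀) Vorbis.L.residue_decode.entry (Vorbis.Spec.residue_decode.spec others frames Blk len)

end Vorbis.Spec.residue_decode
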